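-- pv_equiv track=rewrite | github.com/KumarAmbuj/gfg_string_arithematic_operation | 1.SMALLEST NO WITH GIVEN SUM.py | findsmallestno
-- ===== SOURCE A (Python) =====
-- def findsmallestno(n):
--     m=n
--     res=''
--
--     for i in range(9,0,-1):
--         k=n//i
--         res=str(i)*k+res
--         n=n%i
--
--         if n==0:
--             break
--
--     res=res+'0'*m
--     return res
-- ===== SOURCE B (Python) =====
-- def findsmallestno(n):
--     nines, r = divmod(n, 9)
--     digits = (str(r) if r != 0 else '') + '9' * nines
--     return digits + '0' * n
-- ===== Notes on version B (the rewrite author's own statement) =====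
-- stated objective: simpler
-- what changed: Replaces the greedy 9..1 digit loop with a single closed-form divmod(n,9): remainder digit (if nonzero) followed by a run of nines, then the unconditional '0'*n tail.
import Mathlib
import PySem

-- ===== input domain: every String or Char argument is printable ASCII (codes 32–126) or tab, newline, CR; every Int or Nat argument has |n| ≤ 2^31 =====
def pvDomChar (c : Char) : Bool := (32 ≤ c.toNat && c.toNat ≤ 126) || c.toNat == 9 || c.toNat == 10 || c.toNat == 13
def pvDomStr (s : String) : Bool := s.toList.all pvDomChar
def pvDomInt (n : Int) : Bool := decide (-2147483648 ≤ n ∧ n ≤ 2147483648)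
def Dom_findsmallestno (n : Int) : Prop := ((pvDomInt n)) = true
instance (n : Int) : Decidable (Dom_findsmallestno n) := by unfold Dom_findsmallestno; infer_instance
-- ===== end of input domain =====

-- B replaces A's greedy 9..1 digit loop by one closed-form divmod(n, 9); objective: simpler.

-- ===== PORT A =====
-- the 'for i in range(9,0,-1)' loop with its break; state (n, res) as in A
def findsmallestnoLoop : List Int → Int → List Char → List Char
  | [], _, res => res
  | i :: rest, n, res =>
      let k := PySem.Int.floordiv n i
      let res' := PySem.List.pyRepeat (PySem.Int.toChars i) k ++ res
      let n' := PySem.Int.mod n i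
      if n' = 0 then res' else findsmallestnoLoop rest n' res'

def findsmallestno (n : Int) : String :=
  let m := n
  let res := findsmallestnoLoop (PySem.List.pyRange 9 0 (-1)) n []
  String.ofList (res ++ PySem.List.pyRepeat ['0'] m)

-- ===== PORT B =====
def findsmallestno_alt (n : Int) : String :=
  let nines := PySem.Int.floordiv n 9
  let r := PySem.Int.mod n 9
  let digits := (if r ≠ 0 then PySem.Int.toChars r else []) ++ PySem.List.pyRepeat ['9'] nines
  String.ofList (digits ++ PySem.List.pyRepeat ['0'] n)

-- ===== PRECONDITION & SPEC =====
def Spec_findsmallestno (n : Int) (out : String) : Prop := out = findsmallestno_alt n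
instance (n : Int) (out : String) : Decidable (Spec_findsmallestno n out) := by unfold Spec_findsmallestno; infer_instance

-- ===== CLAIM (what is proved, stated in full; the proofs are below) =====
def Claim_equal_findsmallestno : Prop := ∀ (n : Int), Dom_findsmallestno n → Spec_findsmallestno n (findsmallestno n)

-- ===== LEMMAS AND PROOFS =====

theorem pvRepeat_zero (xs : List Char) : PySem.List.pyRepeat xs 0 = [] := by
  simp [PySem.List.pyRepeat]

theorem pvRepeat_one (xs : List Char) : PySem.List.pyRepeat xs 1 = xs := by
  simp [PySem.List.pyRepeat]

-- after the i = 9 iteration the residue is in [1,8] (if nonzero) and the rest of A's loop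
-- just prepends that one digit
theorem findsmallestnoLoop_small (n : Int) (res : List Char) (h1 : 1 ≤ n) (h8 : n ≤ 8) :
    findsmallestnoLoop (PySem.List.pyRange 8 0 (-1)) n res = PySem.Int.toChars n ++ res := by
  have hrange : PySem.List.pyRange 8 0 (-1) = [8,7,6,5,4,3,2,1] := by decide
  rw [hrange]
  interval_cases n <;>
    simp [findsmallestnoLoop, PySem.Int.floordiv, PySem.Int.mod, pvRepeat_zero, pvRepeat_one]

-- ===== VERDICT (by name: the statement is the Claim_ definition above) =====
theorem findsmallestno_spec : Claim_equal_findsmallestno := by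
  unfold Claim_equal_findsmallestno Spec_findsmallestno
  intro n _
  have hrange : PySem.List.pyRange 9 0 (-1) = 9 :: PySem.List.pyRange 8 0 (-1) := by decide
  have h9 : PySem.Int.toChars 9 = ['9'] := by decide
  have hnn : 0 ≤ PySem.Int.mod n 9 := PySem.Int.mod_nonneg n (by norm_num)
  have hlt : PySem.Int.mod n 9 < 9 := PySem.Int.mod_lt n (by norm_num)
  unfold findsmallestno findsmallestno_alt
  rw [hrange]
  simp only [findsmallestnoLoop, h9]
  by_cases hdvd : (9 : Int) ∣ n
  · have h0 : PySem.Int.mod n 9 = 0 := (PySem.Int.mod_eq_zero_iff_dvd n 9).2 hdvd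
    simp [hdvd]
  · have h0 : PySem.Int.mod n 9 ≠ 0 := fun h => hdvd ((PySem.Int.mod_eq_zero_iff_dvd n 9).1 h)
    rw [if_neg h0, findsmallestnoLoop_small _ _ (by omega) (by omega)]
    simp [hdvd, List.append_assoc]
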